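-- pv_equiv track=rewrite | github.com/threatcode/threat-ci-pipeline | images/scripts/check_rc_bugs.py | merged_dupe
-- ===== SOURCE A (Python) =====
-- def merged_dupe(merged_bugs, current, bug_nrs):
--     if not merged_bugs:
--         return False
--     for merged_bug in sorted(merged_bugs):
--         if merged_bug > current:
--             return False
--         if merged_bug < current and merged_bug in bug_nrs:
--             return True
-- ===== SOURCE B (Python) =====
-- def merged_dupe(merged_bugs, current, bug_nrs):
--     if not merged_bugs:
--         return False
--     bug_set = set(bug_nrs)
--     has_smaller_match = False
--     has_larger = False
--     for m in merged_bugs: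
--         if m < current and m in bug_set:
--             has_smaller_match = True
--         elif m > current:
--             has_larger = True
--     if has_smaller_match:
--         return True
--     if has_larger:
--         return False
--     return None
-- ===== Notes on version B (the rewrite author's own statement) =====
-- stated objective: faster
-- what changed: Replaced the sort-then-scan (whose only purpose is to let a qualifying smaller bug win over a larger one) by a single unsorted pass maintaining two flags plus a set for membership, deciding True/False/None from the flags at the end.
import Mathlib
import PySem

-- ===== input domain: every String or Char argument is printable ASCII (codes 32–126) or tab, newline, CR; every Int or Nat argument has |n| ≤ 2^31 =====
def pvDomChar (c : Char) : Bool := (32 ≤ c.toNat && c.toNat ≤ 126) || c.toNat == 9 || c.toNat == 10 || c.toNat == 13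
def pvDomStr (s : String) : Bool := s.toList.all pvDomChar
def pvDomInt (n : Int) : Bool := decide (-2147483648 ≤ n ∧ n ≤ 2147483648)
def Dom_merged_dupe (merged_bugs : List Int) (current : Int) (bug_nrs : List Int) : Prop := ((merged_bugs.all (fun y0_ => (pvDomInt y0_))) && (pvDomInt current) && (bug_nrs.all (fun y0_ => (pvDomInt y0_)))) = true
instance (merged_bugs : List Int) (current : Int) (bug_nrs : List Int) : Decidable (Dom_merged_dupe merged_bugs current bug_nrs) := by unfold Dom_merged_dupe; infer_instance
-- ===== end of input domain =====

-- B replaces A's sort-then-scan by a single unsorted pass with two flags and a set (asymptotically faster).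


-- ===== PORT A =====
-- loop body of A: for merged_bug in sorted(merged_bugs): …  (fall-through = implicit None)
def mdLoopA (current : Int) (bug_nrs : List Int) : List Int → Option Bool
  | [] => none
  | m :: rest =>
    if current < m then some false
    else if m < current ∧ bug_nrs.contains m then some true
    else mdLoopA current bug_nrs rest

def merged_dupe (merged_bugs : List Int) (current : Int) (bug_nrs : List Int) : Option Bool :=
  if merged_bugs = [] then some false
  else mdLoopA current bug_nrs (PySem.List.sorted merged_bugs (fun x => x) false)

-- ===== PORT B =====
-- B: one unsorted pass accumulating has_smaller_match / has_larger flags; no sort.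
def merged_dupe_alt (merged_bugs : List Int) (current : Int) (bug_nrs : List Int) : Option Bool :=
  if merged_bugs = [] then some false
  else
    let bug_set := PySem.Set.ofList bug_nrs
    let flags := merged_bugs.foldl (fun (p : Bool × Bool) m =>
      if m < current ∧ bug_set.contains m then (true, p.2)
      else if current < m then (p.1, true)
      else p) (false, false)
    if flags.1 then some true
    else if flags.2 then some false
    else none

-- ===== PRECONDITION & SPEC =====
def Spec_merged_dupe (merged_bugs : List Int) (current : Int) (bug_nrs : List Int) (out : Option Bool) : Prop := out = merged_dupe_alt merged_bugs current bug_nrs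
instance (merged_bugs : List Int) (current : Int) (bug_nrs : List Int) (out : Option Bool) : Decidable (Spec_merged_dupe merged_bugs current bug_nrs out) := by unfold Spec_merged_dupe; infer_instance

-- ===== CLAIM (what is proved, stated in full; the proofs are below) =====
def Claim_equal_merged_dupe : Prop := ∀ (merged_bugs : List Int) (current : Int) (bug_nrs : List Int), Dom_merged_dupe merged_bugs current bug_nrs → Spec_merged_dupe merged_bugs current bug_nrs (merged_dupe merged_bugs current bug_nrs)

-- ===== LEMMAS AND PROOFS =====

-- B's fold computes the two existence flags.
theorem flags_foldl (current : Int) (bs : PySem.Set Int) (l : List Int) (a b : Bool) :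
    l.foldl (fun (p : Bool × Bool) m =>
      if m < current ∧ bs.contains m then (true, p.2)
      else if current < m then (p.1, true)
      else p) (a, b)
    = (a || l.any (fun m => decide (m < current) && bs.contains m),
       b || l.any (fun m => decide (current < m))) := by
  induction l generalizing a b with
  | nil => simp
  | cons m rest ih =>
    simp only [List.foldl_cons, List.any_cons]
    by_cases h1 : m < current ∧ bs.contains m
    · rw [if_pos h1, ih]
      have hPm : (decide (m < current) && bs.contains m) = true := by
        rw [decide_eq_true h1.1, h1.2, Bool.true_and]
      have hQm : decide (current < m) = false := decide_eq_false (by omega)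
      rw [hPm, hQm, Bool.true_or, Bool.or_true, Bool.false_or]
    · rw [if_neg h1]
      have hPm : (decide (m < current) && bs.contains m) = false := by
        rw [Bool.and_eq_false_iff]
        by_cases hm : m < current
        · cases hc : bs.contains m with
          | false => exact Or.inr rfl
          | true => exact absurd ⟨hm, hc⟩ h1
        · exact Or.inl (decide_eq_false hm)
      by_cases h2 : current < m
      · rw [if_pos h2, ih, hPm]
        rw [decide_eq_true h2, Bool.false_or, Bool.true_or, Bool.or_true]
      · rw [if_neg h2, ih, hPm]
        rw [decide_eq_false h2, Bool.false_or, Bool.false_or]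

-- A's loop over a sorted (≤-pairwise) list is decided by the same two existence flags.
theorem loopA_char (current : Int) (bug_nrs : List Int) (l : List Int)
    (hs : l.Pairwise (· ≤ ·)) :
    mdLoopA current bug_nrs l
    = (if l.any (fun m => decide (m < current) && bug_nrs.contains m) then some true
       else if l.any (fun m => decide (current < m)) then some false
       else none) := by
  induction l with
  | nil => simp [mdLoopA]
  | cons m rest ih =>
    have hle : ∀ y ∈ rest, m ≤ y := (List.pairwise_cons.mp hs).1
    have hrest := (List.pairwise_cons.mp hs).2
    simp only [mdLoopA, List.any_cons]
    by_cases h2 : current < m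
    · rw [if_pos h2]
      have hnoP : ∀ y ∈ m :: rest, (decide (y < current) && bug_nrs.contains y) = false := by
        intro y hy
        have hny : ¬ y < current := by
          rcases List.mem_cons.mp hy with h | h
          · omega
          · have := hle y h; omega
        rw [decide_eq_false hny, Bool.false_and]
      have hall : rest.any (fun m => decide (m < current) && bug_nrs.contains m) = false :=
        List.any_eq_false.mpr fun y hy => by
          rw [hnoP y (List.mem_cons_of_mem _ hy)]; simp
      simp only [hnoP m List.mem_cons_self, hall, Bool.false_or, decide_eq_true h2,
        Bool.true_or, Bool.or_false, if_true, if_false]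
      simp
    · rw [if_neg h2]
      by_cases h1 : m < current ∧ bug_nrs.contains m
      · rw [if_pos h1]
        have hPm : (decide (m < current) && bug_nrs.contains m) = true := by
          rw [decide_eq_true h1.1, h1.2, Bool.true_and]
        simp only [hPm, Bool.true_or]
        simp
      · rw [if_neg h1, ih hrest]
        have hPm : (decide (m < current) && bug_nrs.contains m) = false := by
          rw [Bool.and_eq_false_iff]
          by_cases hm : m < current
          · cases hc : bug_nrs.contains m with
            | false => exact Or.inr rfl
            | true => exact absurd ⟨hm, hc⟩ h1
          · exact Or.inl (decide_eq_false hm)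
        simp only [hPm, decide_eq_false h2, Bool.false_or]

theorem any_perm {l1 l2 : List Int} (h : l1.Perm l2) (p : Int → Bool) :
    l1.any p = l2.any p := by
  rcases Bool.eq_false_or_eq_true (l2.any p) with h2 | h2 <;> rw [h2]
  · rw [List.any_eq_true] at h2 ⊢
    obtain ⟨x, hx, hp⟩ := h2; exact ⟨x, h.mem_iff.mpr hx, hp⟩
  · rw [List.any_eq_false] at h2 ⊢
    intro x hx; exact h2 x (h.mem_iff.mp hx)

theorem contains_ofList (bn : List Int) (m : Int) :
    (PySem.Set.ofList bn).contains m = bn.contains m := by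
  rcases Bool.eq_false_or_eq_true (bn.contains m) with h | h <;> rw [h] <;>
    simp_all [PySem.Set.contains_iff, PySem.Set.mem_ofList, List.contains_eq_mem]

-- ===== VERDICT (by name: the statement is the Claim_ definition above) =====
theorem merged_dupe_spec : Claim_equal_merged_dupe := by
  intro merged_bugs current bug_nrs _
  unfold Spec_merged_dupe merged_dupe merged_dupe_alt
  by_cases hnil : merged_bugs = []
  · simp [hnil]
  · rw [if_neg hnil, if_neg hnil]
    have hpair : (PySem.List.sorted merged_bugs (fun x => x) false).Pairwise (· ≤ ·) :=
      PySem.List.sorted_pairwise merged_bugs (fun x => x)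
    rw [loopA_char current bug_nrs _ hpair]
    simp only [flags_foldl, Bool.false_or]
    have hperm := PySem.List.sorted_perm merged_bugs (fun x : Int => x) false
    rw [any_perm hperm, any_perm hperm]
    have hc : (merged_bugs.any fun m => decide (m < current) && bug_nrs.contains m)
        = (merged_bugs.any fun m => decide (m < current) && (PySem.Set.ofList bug_nrs).contains m) :=
      by simp only [contains_ofList]
    rw [hc]
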